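-- pv_equiv track=rewrite | github.com/supergilbert/debootstrapmgr | diskhdr.py | dkhr_check_partitions_size
-- ===== SOURCE A (Python) =====
-- def dkhr_check_partitions_size(partitions):
--     infinite_size_found = False
--     for partinfo in partitions:
--         if not "size" in partinfo.keys():
--             if infinite_size_found:
--                 return False
--             infinite_size_found = True
--     return True
-- ===== SOURCE B (Python) =====
-- def dkhr_check_partitions_size(partitions):
--     # Stage 1: flag list (keeps the .keys() call so a non-dict raises as in A).
--     has_size = ["size" in p.keys() for p in partitions]
--     # Stage 2: locate the first partition without a size.
--     try:
--         first_missing = has_size.index(False)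
--     except ValueError:
--         return True
--     # Stage 3: every partition after it must have a size.
--     return all(has_size[first_missing + 1:])
-- ===== Notes on version B (the rewrite author's own statement) =====
-- stated objective: alternative
-- what changed: Replaces A's single loop with a carried two-state flag and early return by a staged pipeline: materialise the has-size flag list, find the index of the first missing size, then check all flags after that index.
import Mathlib
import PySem

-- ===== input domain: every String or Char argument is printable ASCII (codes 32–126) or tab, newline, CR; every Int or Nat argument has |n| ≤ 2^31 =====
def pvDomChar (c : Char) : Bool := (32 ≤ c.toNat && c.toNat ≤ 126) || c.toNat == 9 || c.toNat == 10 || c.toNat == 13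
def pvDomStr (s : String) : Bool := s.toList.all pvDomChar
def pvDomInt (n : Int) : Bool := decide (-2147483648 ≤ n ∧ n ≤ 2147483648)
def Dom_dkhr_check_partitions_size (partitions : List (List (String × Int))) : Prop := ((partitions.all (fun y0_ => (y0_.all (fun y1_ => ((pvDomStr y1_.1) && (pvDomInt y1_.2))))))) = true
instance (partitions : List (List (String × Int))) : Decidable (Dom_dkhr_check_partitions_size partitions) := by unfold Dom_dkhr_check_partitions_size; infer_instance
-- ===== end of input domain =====

-- B replaces A's carried two-state flag with early return by a staged pipeline: flag list, index of first missing size, all-check on the tail (objective: alternative).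
-- ===== PORT A =====
def dkhr_A_loop (partitions : List (List (String × Int))) (infinite_size_found : Bool) : Bool :=
  match partitions with
  | [] => true
  | partinfo :: rest =>
    if ¬ ("size" ∈ partinfo.map Prod.fst) then
      if infinite_size_found then false
      else dkhr_A_loop rest true
    else dkhr_A_loop rest infinite_size_found

def dkhr_check_partitions_size (partitions : List (List (String × Int))) : Bool :=
  dkhr_A_loop partitions false

-- ===== PORT B =====
def dkhr_check_partitions_size_alt (partitions : List (List (String × Int))) : Bool :=
  let has_size : List Bool := partitions.map (fun p => decide ("size" ∈ p.map Prod.fst))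
  match PySem.List.index? has_size false with
  | none => true
  | some first_missing => (PySem.List.slice has_size (some ((first_missing : Int) + 1)) none).all id

-- ===== PRECONDITION & SPEC =====
def Spec_dkhr_check_partitions_size (partitions : List (List (String × Int))) (out : Bool) : Prop := out = dkhr_check_partitions_size_alt partitions
instance (partitions : List (List (String × Int))) (out : Bool) : Decidable (Spec_dkhr_check_partitions_size partitions out) := by unfold Spec_dkhr_check_partitions_size; infer_instance

-- ===== CLAIM (what is proved, stated in full; the proofs are below) =====
def Claim_equal_dkhr_check_partitions_size : Prop := ∀ (partitions : List (List (String × Int))), Dom_dkhr_check_partitions_size partitions → Spec_dkhr_check_partitions_size partitions (dkhr_check_partitions_size partitions)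

-- ===== LEMMAS AND PROOFS =====
-- Proof-only helper: A's loop replayed over the flag list.
def dkhr_flags_loop (hs : List Bool) (b : Bool) : Bool :=
  match hs with
  | [] => true
  | h :: t => if h then dkhr_flags_loop t b else if b then false else dkhr_flags_loop t true

lemma dkhr_A_loop_eq_flags (partitions : List (List (String × Int))) (b : Bool) :
    dkhr_A_loop partitions b =
      dkhr_flags_loop (partitions.map (fun p => decide ("size" ∈ p.map Prod.fst))) b := by
  induction partitions generalizing b with
  | nil => simp [dkhr_A_loop, dkhr_flags_loop]
  | cons h t ih =>
    by_cases hk : ("size" ∈ h.map Prod.fst) <;>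
      simp [dkhr_A_loop, dkhr_flags_loop, hk, ih]

-- Once a missing flag has been seen, A's loop accepts iff every remaining flag is true.
lemma dkhr_flags_loop_true (t : List Bool) : dkhr_flags_loop t true = t.all id := by
  induction t with
  | nil => simp [dkhr_flags_loop]
  | cons h2 t2 ih2 => cases h2 <;> simp [dkhr_flags_loop, ih2]

-- The core fact on flag lists: A's carried-flag recursion equals B's index-then-all pipeline.
lemma flags_loop_eq_pipeline (hs : List Bool) :
    dkhr_flags_loop hs false =
      (match PySem.List.index? hs false with
       | none => true
       | some first_missing => (PySem.List.slice hs (some ((first_missing : Int) + 1)) none).all id) := by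
  induction hs with
  | nil => simp [dkhr_flags_loop, PySem.List.index?]
  | cons h t ih =>
    cases h with
    | true =>
      rw [show PySem.List.index? (true :: t) false = (PySem.List.index? t false).map (· + 1)
            from PySem.List.index?_cons_of_ne t (by decide)]
      cases hidx : PySem.List.index? t false with
      | none => rw [hidx] at ih; simpa [dkhr_flags_loop, hidx] using ih
      | some k =>
        rw [hidx] at ih
        simp only [Option.map_some]
        have hsl : PySem.List.slice (true :: t) (some ((k + 1 : Nat) + 1 : Int)) none
             = PySem.List.slice t (some ((k : Int) + 1)) none := by
          have h1 : ((k + 1 : Nat) + 1 : Int) = ((k + 2 : Nat) : Int) := by push_cast; ring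
          have h2 : ((k : Int) + 1) = ((k + 1 : Nat) : Int) := by push_cast; ring
          rw [h1, h2, PySem.List.slice_from_natCast, PySem.List.slice_from_natCast]
          simp
        push_cast
        push_cast at hsl
        rw [hsl]
        simpa [dkhr_flags_loop] using ih
    | false =>
      rw [PySem.List.index?_cons_self]
      have hslice : PySem.List.slice (false :: t) (some ((0 : Nat) + 1 : Int)) none = t := by
        have h0 : ((0 : Nat) + 1 : Int) = ((1 : Nat) : Int) := by norm_num
        rw [h0, PySem.List.slice_from_natCast]; simp
      simp only [Nat.cast_zero] at hslice ⊢
      rw [hslice]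
      simpa [dkhr_flags_loop] using dkhr_flags_loop_true t

-- ===== VERDICT (by name: the statement is the Claim_ definition above) =====
theorem dkhr_check_partitions_size_spec : Claim_equal_dkhr_check_partitions_size := by
  intro partitions _
  unfold Spec_dkhr_check_partitions_size dkhr_check_partitions_size dkhr_check_partitions_size_alt
  rw [dkhr_A_loop_eq_flags, flags_loop_eq_pipeline]
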